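-- pv_equiv track=rewrite | github.com/axelcoezard/Licence-Informatique | Licence 2/I33/TP 1/ex_5.py | minimum_posi
-- ===== SOURCE A (Python) =====
-- def minimum_posi(L):
-- 	M = [0]
-- 	minimum = L[0]
-- 	i = 1
-- 	while i < len(L):
-- 		if L[i] < minimum:
-- 			minimum = L[i]
-- 			M = [i]
-- 		elif L[i] == minimum:
-- 			M.append(i)
-- 		i += 1
-- 	return M
-- ===== SOURCE B (Python) =====
-- def minimum_posi(L):
--     minimum = L[0]
--     for x in L:
--         if x < minimum:
--             minimum = x
--     return [i for i, x in enumerate(L) if x == minimum]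
-- ===== Notes on version B (the rewrite author's own statement) =====
-- stated objective: simpler
-- what changed: Replaces A's single fused index-walking scan that maintains both the running minimum and the rebuilt position list with two plain passes: one fold to find the minimum, then a comprehension collecting all matching indices.
import Mathlib
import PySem

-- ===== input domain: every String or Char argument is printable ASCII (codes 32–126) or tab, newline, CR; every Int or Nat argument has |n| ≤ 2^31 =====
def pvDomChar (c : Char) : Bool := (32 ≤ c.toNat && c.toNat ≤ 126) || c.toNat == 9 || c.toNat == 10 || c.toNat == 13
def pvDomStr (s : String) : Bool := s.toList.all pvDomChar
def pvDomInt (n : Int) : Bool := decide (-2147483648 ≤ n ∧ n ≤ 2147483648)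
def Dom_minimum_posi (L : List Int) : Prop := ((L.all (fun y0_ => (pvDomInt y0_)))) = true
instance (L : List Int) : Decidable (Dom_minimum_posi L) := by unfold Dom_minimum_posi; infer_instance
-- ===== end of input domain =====

-- B replaces A's fused scan (running minimum + rebuilt index list) by two passes:
-- a fold finding the minimum, then a comprehension of the matching indices.
-- Equivalence is about the return value; both raise IndexError on [] (excluded by Pre_).

-- ===== PORT A =====
-- A's while loop over i = 1 .. len(L)-1, walking the tail with the index carried along;
-- state (minimum, M) exactly as in the Python.
def minimum_posi_loop (t : List Int) (minimum : Int) (M : List Int) (i : Int) : List Int :=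
  match t with
  | [] => M
  | x :: r =>
    if x < minimum then minimum_posi_loop r x [i] (i + 1)
    else if x == minimum then minimum_posi_loop r minimum (M ++ [i]) (i + 1)
    else minimum_posi_loop r minimum M (i + 1)

def minimum_posi (L : List Int) : List Int :=
  match L with
  | [] => []          -- Python raises IndexError (first-element access); excluded by Pre_minimum_posi
  | h :: t => minimum_posi_loop t h [0] 1

-- ===== PORT B =====
-- the comprehension [i for i, x in enumerate(L) if x == minimum], counter carried along
def minimum_posi_comp (t : List Int) (m : Int) (i : Int) : List Int :=
  match t with
  | [] => []
  | x :: r => if x == m then i :: minimum_posi_comp r m (i + 1) else minimum_posi_comp r m (i + 1)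

def minimum_posi_alt (L : List Int) : List Int :=
  match L with
  | [] => []          -- Python raises IndexError (first-element access); excluded by Pre_minimum_posi
  | h :: t =>
    let minimum := L.foldl (fun acc x => if x < acc then x else acc) h
    minimum_posi_comp L minimum 0

-- ===== PRECONDITION & SPEC =====
-- Pre_ excludes only the empty list, on which A (and B) raise IndexError when reading the first element.
def Pre_minimum_posi (L : List Int) : Prop := L ≠ []
instance (L : List Int) : Decidable (Pre_minimum_posi L) := by unfold Pre_minimum_posi; infer_instance
def pvWitness_minimum_posi : List Int := [3, 1, 1, 2]

def Spec_minimum_posi (L : List Int) (out : List Int) : Prop := out = minimum_posi_alt L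
instance (L : List Int) (out : List Int) : Decidable (Spec_minimum_posi L out) := by unfold Spec_minimum_posi; infer_instance

-- ===== CLAIM (what is proved, stated in full; the proofs are below) =====
def Claim_equal_minimum_posi : Prop := ∀ (L : List Int), Dom_minimum_posi L → Pre_minimum_posi L → Spec_minimum_posi L (minimum_posi L)

-- ===== LEMMAS AND PROOFS =====

-- the fold B uses to find the minimum
def pvFmin (t : List Int) (m : Int) : Int := t.foldl (fun acc x => if x < acc then x else acc) m

lemma pvFmin_le (t : List Int) : ∀ m : Int, pvFmin t m ≤ m := by
  induction t with
  | nil => intro m; simp [pvFmin]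
  | cons x r ih =>
    intro m
    simp only [pvFmin, List.foldl] at *
    split_ifs with h
    · exact le_trans (ih x) (le_of_lt h)
    · exact ih m

lemma comp_unfold (x : Int) (r : List Int) (m i : Int) :
    minimum_posi_comp (x :: r) m i =
      if x = m then i :: minimum_posi_comp r m (i + 1) else minimum_posi_comp r m (i + 1) := by
  simp [minimum_posi_comp, beq_iff_eq]

lemma loop_eq (t : List Int) : ∀ (m : Int) (M : List Int) (i : Int),
    minimum_posi_loop t m M i =
      if pvFmin t m < m then minimum_posi_comp t (pvFmin t m) i
      else M ++ minimum_posi_comp t m i := by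
  induction t with
  | nil => intro m M i; simp [pvFmin, minimum_posi_loop, minimum_posi_comp]
  | cons x r ih =>
    intro m M i
    have hfx : pvFmin (x :: r) m = pvFmin r (if x < m then x else m) := rfl
    have hloop : minimum_posi_loop (x :: r) m M i =
        if x < m then minimum_posi_loop r x [i] (i + 1)
        else if x = m then minimum_posi_loop r m (M ++ [i]) (i + 1)
        else minimum_posi_loop r m M (i + 1) := by
      simp [minimum_posi_loop, beq_iff_eq]
    rw [hloop, hfx]
    by_cases hlt : x < m
    · -- strict new minimum: M reset to [i]
      rw [if_pos hlt, if_pos hlt, ih]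
      have hle := pvFmin_le r x
      rw [if_pos (lt_of_le_of_lt hle hlt), comp_unfold]
      rcases lt_or_eq_of_le hle with h2 | h2
      · rw [if_pos h2, if_neg (by omega)]
      · rw [if_neg (by omega), if_pos h2.symm, h2, List.singleton_append]
    · rw [if_neg hlt, if_neg hlt]
      have hle := pvFmin_le r m
      by_cases heq : x = m
      · -- equal to the current minimum: append i
        rw [if_pos heq, ih]
        by_cases h2 : pvFmin r m < m
        · rw [if_pos h2, if_pos h2, comp_unfold, if_neg (by omega)]
        · rw [if_neg h2, if_neg h2, comp_unfold, if_pos heq, List.append_assoc,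
            List.singleton_append]
      · -- strictly larger: skip
        rw [if_neg heq, ih]
        by_cases h2 : pvFmin r m < m
        · rw [if_pos h2, if_pos h2, comp_unfold, if_neg (by omega)]
        · rw [if_neg h2, if_neg h2, comp_unfold, if_neg heq]

-- ===== VERDICT (by name: the statement is the Claim_ definition above) =====
theorem minimum_posi_spec : Claim_equal_minimum_posi := by
  intro L _ hpre
  unfold Spec_minimum_posi
  match L with
  | [] => exact absurd rfl hpre
  | h :: t =>
    show minimum_posi_loop t h [0] 1 = minimum_posi_alt (h :: t)
    have hm : (h :: t).foldl (fun acc x => if x < acc then x else acc) h = pvFmin t h := by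
      simp [pvFmin, List.foldl]
    have halt : minimum_posi_alt (h :: t) = minimum_posi_comp (h :: t) (pvFmin t h) 0 := by
      simp only [minimum_posi_alt, hm]
    rw [halt, loop_eq t h [0] 1, comp_unfold]
    have hle := pvFmin_le t h
    by_cases h2 : pvFmin t h < h
    · rw [if_pos h2, if_neg (by omega)]
      norm_num
    · have hx : pvFmin t h = h := le_antisymm hle (not_lt.mp h2)
      rw [if_neg h2, hx, if_pos rfl, List.singleton_append]
      norm_num
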